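-- pv_equiv track=rewrite | github.com/tianceshi-python/practice_pro | meeting_ptactice/Decorator_dir/find_maxstr.py | get_max_char_collec
-- ===== SOURCE A (Python) =====
-- from collections import Counter
--
-- def get_max_char_collec(string):
--     count = Counter(string)
--     # 以为count现在是一个对象，利用他的属性--count.values()取出其中的值
--     count_list = list(count.values())
--     max_value = max(count_list)
--     max_list = []
--     for k, v in count.items():
--         if v == max_value:
--             max_list.append(k)
--     # max_list = sorted(max_list) #加这个排序的原因是，如果你找到 两个或两个以上的具有相同的频率的字母， 返回那个先出现在字母表中的字母
--     # return max_list[0]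
--     return max_list
-- ===== SOURCE B (Python) =====
-- from collections import Counter
--
-- def get_max_char_collec(string):
--     count = Counter(string)
--     buckets = {}
--     for ch, v in count.items():
--         buckets.setdefault(v, []).append(ch)
--     return buckets[max(buckets)]
-- ===== Notes on version B (the rewrite author's own statement) =====
-- stated objective: alternative
-- what changed: B inverts the Counter into a frequency->chars bucket dict and returns the bucket of the maximal frequency key, instead of A's flat max-then-filter pass over the Counter items.
import Mathlib
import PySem

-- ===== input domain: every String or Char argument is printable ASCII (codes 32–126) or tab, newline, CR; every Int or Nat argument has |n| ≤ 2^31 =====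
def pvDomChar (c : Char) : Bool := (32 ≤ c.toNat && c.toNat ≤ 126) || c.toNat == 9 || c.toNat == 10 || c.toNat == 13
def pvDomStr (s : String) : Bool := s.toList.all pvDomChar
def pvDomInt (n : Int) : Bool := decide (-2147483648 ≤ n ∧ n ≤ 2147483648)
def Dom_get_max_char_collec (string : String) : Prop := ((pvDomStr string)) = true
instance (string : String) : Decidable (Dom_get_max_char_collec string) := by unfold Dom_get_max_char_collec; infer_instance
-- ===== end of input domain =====

-- B inverts the Counter into a frequency→characters bucket dict and returns the bucket of the
-- maximal frequency key, instead of A's max-then-filter pass; same cost, different decomposition.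

-- ===== PORT A =====
def get_max_char_collec (string : String) : List String :=
  let count := PySem.Dict.counter string.toList
  let count_list := PySem.Dict.values count
  match PySem.List.max? count_list (fun v => v) with
  | none => []   -- max([]) raises ValueError here; excluded by Pre_
  | some max_value =>
      (PySem.Dict.items count).foldl
        (fun max_list kv => if kv.2 == max_value then max_list ++ [String.mk [kv.1]] else max_list) []

-- ===== PORT B =====
def get_max_char_collec_alt (string : String) : List String :=
  let count := PySem.Dict.counter string.toList
  let buckets := (PySem.Dict.items count).foldl
      (fun b kv => PySem.Dict.modify b kv.2 [] (· ++ [String.mk [kv.1]])) PySem.Dict.empty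
  match PySem.List.max? (PySem.Dict.keys buckets) (fun v => v) with
  | none => []   -- max of an empty dict raises ValueError here; excluded by Pre_
  | some m => PySem.Dict.getD buckets m []

-- ===== PRECONDITION & SPEC =====
-- Pre_ excludes exactly the empty string, on which A raises ValueError (max of an empty list).
def Pre_get_max_char_collec (string : String) : Prop := string.toList ≠ []
instance (string : String) : Decidable (Pre_get_max_char_collec string) := by unfold Pre_get_max_char_collec; infer_instance
def pvWitness_get_max_char_collec : String := "abcbc"
def Spec_get_max_char_collec (string : String) (out : List String) : Prop := out = get_max_char_collec_alt string
instance (string : String) (out : List String) : Decidable (Spec_get_max_char_collec string out) := by unfold Spec_get_max_char_collec; infer_instance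

-- ===== CLAIM (what is proved, stated in full; the proofs are below) =====
def Claim_equal_get_max_char_collec : Prop := ∀ (string : String), Dom_get_max_char_collec string → Pre_get_max_char_collec string → Spec_get_max_char_collec string (get_max_char_collec string)

-- ===== LEMMAS AND PROOFS =====

-- B's bucket dict looked up at m is exactly A's "filter the items with count m".
lemma bucket_getD (l : List (Char × Int)) (m : Int) :
    PySem.Dict.getD (l.foldl (fun b kv => PySem.Dict.modify b kv.2 [] (· ++ [String.mk [kv.1]])) PySem.Dict.empty) m []
      = (l.filter (fun kv => kv.2 == m)).map (fun kv => String.mk [kv.1]) := by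
  rw [← List.foldl_map (f := fun kv : Char × Int => (kv.2, String.mk [kv.1]))
        (g := fun d p => PySem.Dict.modify d p.1 [] (· ++ [p.2]))]
  rw [PySem.Dict.getD_foldl_modify_append]
  simp [List.filter_map, Function.comp_def, List.map_map]

-- B's bucket keys are the distinct counter values, in first-occurrence order.
lemma bucket_keys (l : List (Char × Int)) :
    PySem.Dict.keys (l.foldl (fun b kv => PySem.Dict.modify b kv.2 [] (· ++ [String.mk [kv.1]])) PySem.Dict.empty)
      = PySem.Set.ofList (l.map (·.2)) := by
  rw [PySem.Dict.keys_foldl_modify_key]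
  simp [PySem.Set.ofList, PySem.Set.update]

-- max over the distinct values equals max over all values.
lemma max?_ofList_eq (xs : List Int) :
    PySem.List.max? (PySem.Set.ofList xs) (fun v => v) = PySem.List.max? xs (fun v => v) := by
  cases hx : PySem.List.max? xs (fun v => v) with
  | none =>
    rw [PySem.List.max?_eq_none_iff] at hx
    subst hx; rfl
  | some m =>
    cases hy : PySem.List.max? (PySem.Set.ofList xs) (fun v => v) with
    | none =>
      rw [PySem.List.max?_eq_none_iff] at hy
      have := PySem.List.max?_mem hx
      have h2 : m ∈ PySem.Set.ofList xs := (PySem.Set.mem_ofList _ _).2 this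
      rw [hy] at h2; cases h2
    | some m' =>
      have h1 := PySem.List.max?_mem hx
      have h2 := PySem.List.max?_mem hy
      have h3 := PySem.List.max?_isMax hx
      have h4 := PySem.List.max?_isMax hy
      rw [PySem.Set.mem_ofList] at h2
      have a1 : m' ≤ m := h3 m' h2
      have a2 : m ≤ m' := h4 m ((PySem.Set.mem_ofList _ _).2 h1)
      exact congrArg some (le_antisymm a1 a2)

-- ===== VERDICT (by name: the statement is the Claim_ definition above) =====
theorem get_max_char_collec_spec : Claim_equal_get_max_char_collec := by
  intro s _ _
  unfold Spec_get_max_char_collec get_max_char_collec get_max_char_collec_alt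
  simp only []
  rw [bucket_keys, max?_ofList_eq]
  have hv : PySem.Dict.values (PySem.Dict.counter s.toList)
      = (PySem.Dict.items (PySem.Dict.counter s.toList)).map (·.2) := rfl
  rw [hv]
  cases h : PySem.List.max? ((PySem.Dict.items (PySem.Dict.counter s.toList)).map (·.2)) (fun v => v) with
  | none => rfl
  | some m =>
    simp only [bucket_getD, PySem.List.foldl_append_if]
    simp
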